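-- pv_equiv track=rewrite | github.com/Lafudoci/blast2ref | deseq_represent.py | mesh_counter
-- ===== SOURCE A (Python) =====
-- def mesh_counter(mesh_lists):
-- 	counts_dict = {}
-- 	term_all = []
-- 	for term in mesh_lists:
-- 		if '/' in term:
-- 			term_all = term_all + term.split('/')
-- 		else:
-- 			term_all.append(term)
-- 	for term in set(term_all):
-- 		counts_dict[term] = term_all.count(term)
-- 	return counts_dict
-- ===== SOURCE B (Python) =====
-- def mesh_counter(mesh_lists):
-- 	# One pass: split every term and bump a running counter; no set(), no repeated list.count scans.
-- 	counts = {}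
-- 	for term in mesh_lists:
-- 		for part in term.split('/'):
-- 			counts[part] = counts.get(part, 0) + 1
-- 	return counts
-- ===== Notes on version B (the rewrite author's own statement) =====
-- stated objective: faster
-- what changed: Replaces A's flatten-then-set-then-repeated-list.count (a quadratic rescan per distinct term) with a single pass that splits each term and increments a dict counter incrementally; dict equality is order-independent so the results agree.
import Mathlib
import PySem

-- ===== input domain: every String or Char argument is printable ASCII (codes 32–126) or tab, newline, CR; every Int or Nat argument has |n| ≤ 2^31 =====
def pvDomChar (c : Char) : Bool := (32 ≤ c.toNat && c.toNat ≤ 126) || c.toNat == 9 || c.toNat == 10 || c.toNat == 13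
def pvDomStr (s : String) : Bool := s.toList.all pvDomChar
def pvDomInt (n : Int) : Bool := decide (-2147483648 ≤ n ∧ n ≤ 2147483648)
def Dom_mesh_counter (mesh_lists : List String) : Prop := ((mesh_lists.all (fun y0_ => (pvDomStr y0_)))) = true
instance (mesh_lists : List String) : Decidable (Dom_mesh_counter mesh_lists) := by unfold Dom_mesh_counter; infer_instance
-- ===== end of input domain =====

-- B replaces A's flatten + set() + repeated list.count scans by a single incremental counter pass (O(n) vs O(n^2); return value proved equal).


-- shared primitive: Python's term.split('/') (sep = "/" is nonempty, so s.split('/') is exactly Chars.splitOn; never raises)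
def pySplitSlash (s : String) : List String :=
  (PySem.Chars.splitOn s.toList ['/']).map String.ofList

-- ===== PORT A =====
def mesh_counter (mesh_lists : List String) : List (String × Int) :=
  -- first loop: build term_all, branching on '/' in term
  let term_all := mesh_lists.foldl (fun acc term =>
    if PySem.Str.isIn "/" term then acc ++ pySplitSlash term else acc ++ [term]) []
  -- second loop: for term in set(term_all): counts_dict[term] = term_all.count(term)
  ((PySem.Set.ofList term_all).foldl
    (fun d t => PySem.Dict.insert d t ((PySem.List.count term_all t : Nat) : Int))
    PySem.Dict.empty).items

-- ===== PORT B =====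
def mesh_counter_alt (mesh_lists : List String) : List (String × Int) :=
  (mesh_lists.foldl (fun counts term =>
    (pySplitSlash term).foldl
      (fun c p => PySem.Dict.insert c p (PySem.Dict.getD c p 0 + 1)) counts)
    PySem.Dict.empty).items

-- ===== PRECONDITION & SPEC =====
def Spec_mesh_counter (mesh_lists : List String) (out : List (String × Int)) : Prop := out = mesh_counter_alt mesh_lists
instance (mesh_lists : List String) (out : List (String × Int)) : Decidable (Spec_mesh_counter mesh_lists out) := by unfold Spec_mesh_counter; infer_instance

-- ===== CLAIM (what is proved, stated in full; the proofs are below) =====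
def Claim_equal_mesh_counter : Prop := ∀ (mesh_lists : List String), Dom_mesh_counter mesh_lists → Spec_mesh_counter mesh_lists (mesh_counter mesh_lists)

-- ===== LEMMAS AND PROOFS =====

-- splitOn.go with separator ['/'] on a slash-free list just returns the accumulated piece
theorem splitOn_go_no_slash (fuel : Nat) (l cur : List Char) (acc : List (List Char))
    (h : '/' ∉ l) (hf : l.length ≤ fuel) :
    PySem.Chars.splitOn.go ['/'] fuel l cur acc = ((cur.reverse ++ l) :: acc).reverse := by
  induction fuel generalizing l cur with
  | zero => simp [PySem.Chars.splitOn.go]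
  | succ n ih =>
    cases l with
    | nil => simp [PySem.Chars.splitOn.go]
    | cons c rest =>
      have hc : c ≠ '/' := fun hc => h (hc ▸ List.mem_cons_self)
      have hpre : List.isPrefixOf ['/'] (c :: rest) = false := by
        simp [List.isPrefixOf]; exact fun hq => absurd hq.symm hc
      rw [PySem.Chars.splitOn.go]
      simp only [hpre, Bool.false_eq_true, if_false]
      rw [ih rest (c :: cur) (fun hm => h (List.mem_cons_of_mem _ hm)) (by simpa using Nat.le_of_succ_le_succ hf)]
      simp

theorem splitOn_no_slash (s : List Char) (h : '/' ∉ s) :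
    PySem.Chars.splitOn s ['/'] = [s] := by
  unfold PySem.Chars.splitOn
  rw [splitOn_go_no_slash _ s [] [] h (by omega)]
  simp

theorem pySplitSlash_of_not_isIn (s : String) (h : PySem.Str.isIn "/" s = false) :
    pySplitSlash s = [s] := by
  have h' : '/' ∉ s.toList := by
    simp only [PySem.Str.isIn_eq] at h
    rw [PySem.Chars.isIn_eq_false_iff] at h
    intro hm
    obtain ⟨l1, l2, heq⟩ := List.append_of_mem hm
    exact h (heq ▸ ⟨l1, l2, by simp⟩)
  simp [pySplitSlash, splitOn_no_slash s.toList h']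

-- A's first loop builds exactly the flattening of pySplitSlash
theorem term_all_eq_flatMap (mesh_lists : List String) :
    mesh_lists.foldl (fun acc term =>
      if PySem.Str.isIn "/" term then acc ++ pySplitSlash term else acc ++ [term]) []
    = mesh_lists.flatMap pySplitSlash := by
  have hcongr : mesh_lists.foldl (fun acc term =>
      if PySem.Str.isIn "/" term then acc ++ pySplitSlash term else acc ++ [term]) []
      = mesh_lists.foldl (fun acc term => acc ++ pySplitSlash term) [] := by
    apply PySem.List.foldl_congr_mem
    intro acc x _
    by_cases hx : PySem.Str.isIn "/" x = true
    · rw [if_pos hx]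
    · rw [if_neg hx, pySplitSlash_of_not_isIn x (by simpa using hx)]
  rw [hcongr, PySem.List.foldl_append_eq_flatMap]
  simp

-- A's second loop: inserting each distinct key with its total count, starting from the empty dict, appends
theorem mesh_counter_eq_items_counter (L : List String) :
    ((PySem.Set.ofList L).foldl
      (fun d t => PySem.Dict.insert d t ((PySem.List.count L t : Nat) : Int))
      PySem.Dict.empty).items
    = (PySem.Dict.counter L).items := by
  have h := PySem.Dict.items_foldl_insert_fresh (PySem.Set.ofList L) (fun t => t)
        (fun t => ((PySem.List.count L t : Nat) : Int)) PySem.Dict.empty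
        (fun a _ => PySem.Dict.contains_empty a)
        (by simp)
  simp only [] at h
  rw [h, PySem.Dict.items_counter]
  simp [PySem.List.count_eq, PySem.Dict.empty]

-- B's nested loop is the counter fold over the flattened list
theorem mesh_counter_alt_eq_items_counter (mesh_lists : List String) :
    mesh_counter_alt mesh_lists = (PySem.Dict.counter (mesh_lists.flatMap pySplitSlash)).items := by
  unfold mesh_counter_alt
  rw [← List.foldl_flatMap, PySem.Dict.foldl_insert_getD_add_one_eq_counter]

-- ===== VERDICT (by name: the statement is the Claim_ definition above) =====
theorem mesh_counter_spec : Claim_equal_mesh_counter := by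
  intro mesh_lists _
  unfold Spec_mesh_counter mesh_counter
  rw [term_all_eq_flatMap, mesh_counter_eq_items_counter, mesh_counter_alt_eq_items_counter]
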